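-- pv_equiv track=rewrite | github.com/silviaegt/bdcv_metadata | Comparador/LabFunctions.py | listToReport
-- ===== SOURCE A (Python) =====
-- def listToReport(items):
--     dic = {"a":0,"b":1,"c":2,"d":3,"e":4,"f":5,"g":6,"h":7,"j":8,"k":9,
--     "l":10,"m":11,"n":12,"o":13,"p":14,"q":15,"r":16,"s":17,"t":18,"u":19,
--     "v":20,"x":21,"y":22,"z":23,"0":24,"2":25,"3":26,"4":27,"6":28,"8":29}
--     tmp = []
--     for i in range(len(dic)+1):
--         tmp.append("")
--     for i in items:
--         tmp.pop(dic[i[1]])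
--         tmp.insert(dic[i[1]],str(i[0]))
--     return tmp
-- ===== SOURCE B (Python) =====
-- def listToReport(items):
--     dic = {"a":0,"b":1,"c":2,"d":3,"e":4,"f":5,"g":6,"h":7,"j":8,"k":9,
--     "l":10,"m":11,"n":12,"o":13,"p":14,"q":15,"r":16,"s":17,"t":18,"u":19,
--     "v":20,"x":21,"y":22,"z":23,"0":24,"2":25,"3":26,"4":27,"6":28,"8":29}
--     keyed = [(dic[i[1]], str(i[0])) for i in items]
--     result = []
--     for k in range(len(dic) + 1):
--         cell = ""
--         for kj, sj in keyed:
--             if kj == k: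
--                 cell = sj
--         result.append(cell)
--     return result
-- ===== Notes on version B (the rewrite author's own statement) =====
-- stated objective: alternative
-- what changed: A scatters: one pass over the items writing each str(value) into its slot of a preallocated 31-list by pop/insert; B gathers: it tags each item with its slot index once, then builds the result by looping over the 31 output positions and scanning the tagged items for the last one matching that position.
import Mathlib
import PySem

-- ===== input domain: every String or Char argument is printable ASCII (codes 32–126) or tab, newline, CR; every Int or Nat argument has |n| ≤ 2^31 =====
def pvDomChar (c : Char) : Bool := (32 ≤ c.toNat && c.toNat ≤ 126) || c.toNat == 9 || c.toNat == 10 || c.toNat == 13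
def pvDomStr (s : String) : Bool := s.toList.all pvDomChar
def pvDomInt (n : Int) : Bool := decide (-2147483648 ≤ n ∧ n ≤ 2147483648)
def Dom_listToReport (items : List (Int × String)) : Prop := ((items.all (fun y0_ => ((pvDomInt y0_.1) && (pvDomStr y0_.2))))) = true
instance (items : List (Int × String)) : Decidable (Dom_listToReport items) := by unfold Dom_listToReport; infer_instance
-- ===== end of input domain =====

-- B gathers instead of scattering: it tags each item with its slot index once, then for each
-- of the 31 output positions scans the tagged items keeping the last match (objective: alternative).

-- the literal dict both Python versions build (shared helper)
def pvDic : PySem.Dict String Int := PySem.Dict.ofList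
  [("a",0),("b",1),("c",2),("d",3),("e",4),("f",5),("g",6),("h",7),("j",8),("k",9),
   ("l",10),("m",11),("n",12),("o",13),("p",14),("q",15),("r",16),("s",17),("t",18),("u",19),
   ("v",20),("x",21),("y",22),("z",23),("0",24),("2",25),("3",26),("4",27),("6",28),("8",29)]

-- ===== PORT A =====
-- the second for-loop of A: pop the slot, insert str(i[0]) there; none = KeyError
def listToReportLoop (tmp : List String) : List (Int × String) → Option (List String)
  | [] => some tmp
  | i :: rest =>
    match pvDic.get? i.2 with
    | none => none
    | some idx =>
      match PySem.List.pop? tmp idx with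
      | none => none
      | some r => listToReportLoop (PySem.List.insert r.2 idx (PySem.Int.toStr i.1)) rest

def listToReport (items : List (Int × String)) : List String :=
  (listToReportLoop
    ((PySem.List.pyRange 0 (pvDic.size + 1) 1).foldl (fun t _ => t ++ [""]) []) items).getD []

-- ===== PORT B =====
-- the list comprehension of B tagging each item with its slot; none = KeyError
def listToReportKeyed : List (Int × String) → Option (List (Int × String))
  | [] => some []
  | i :: rest =>
    match pvDic.get? i.2 with
    | none => none
    | some k =>
      match listToReportKeyed rest with
      | none => none
      | some t => some ((k, PySem.Int.toStr i.1) :: t)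

-- B's inner loop: scan the tagged items, keep the last one matching position k
def listToReportCell (keyed : List (Int × String)) (k : Int) : String :=
  keyed.foldl (fun cell p => if p.1 == k then p.2 else cell) ""

def listToReport_alt (items : List (Int × String)) : List String :=
  match listToReportKeyed items with
  | none => []
  | some keyed =>
    (PySem.List.pyRange 0 (pvDic.size + 1) 1).foldl
      (fun result k => result ++ [listToReportCell keyed k]) []

-- ===== PRECONDITION & SPEC =====
-- Pre_ excludes exactly the inputs where some item's character is not a key of the dict:
-- there the Python A raises KeyError.
def Pre_listToReport (items : List (Int × String)) : Prop :=
  (items.all (fun i => pvDic.contains i.2)) = true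
instance (items : List (Int × String)) : Decidable (Pre_listToReport items) := by
  unfold Pre_listToReport; infer_instance

def pvWitness_listToReport : (List (Int × String)) := [(5, "a"), (-3, "8"), (7, "a")]

def Spec_listToReport (items : List (Int × String)) (out : List String) : Prop := out = listToReport_alt items
instance (items : List (Int × String)) (out : List String) : Decidable (Spec_listToReport items out) := by unfold Spec_listToReport; infer_instance

-- ===== CLAIM (what is proved, stated in full; the proofs are below) =====
def Claim_equal_listToReport : Prop := ∀ (items : List (Int × String)), Dom_listToReport items → Pre_listToReport items → Spec_listToReport items (listToReport items)

-- ===== LEMMAS AND PROOFS =====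

-- every value stored in the literal dict is a Nat < 31
lemma pvDic_get?_bounds (s : String) (idx : Int)
    (h : pvDic.get? s = some idx) : 0 ≤ idx ∧ idx < 31 := by
  have hmem := PySem.Dict.mem_items_of_get?_eq_some pvDic h
  have hall : ∀ p ∈ pvDic.items, 0 ≤ p.2 ∧ p.2 < 31 := by decide
  exact hall _ hmem

lemma pvDic_get?_isSome (s : String) (h : pvDic.contains s = true) :
    (pvDic.get? s).isSome = true := by
  rw [PySem.Dict.contains_eq_isSome_get?] at h
  exact h

-- A's scatter loop yields, at each position n, B's gather-fold seeded with tmp's entry at n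
lemma listToReport_main (items : List (Int × String)) :
    ∀ (tmp : List String),
    Pre_listToReport items →
    tmp.length = 31 →
    ∃ keyed, listToReportKeyed items = some keyed ∧
      listToReportLoop tmp items =
        some ((List.range 31).map (fun (n : Nat) =>
          keyed.foldl (fun cell p => if p.1 == (n : Int) then p.2 else cell) (tmp.getD n ""))) := by
  induction items with
  | nil =>
    intro tmp _ hlen
    refine ⟨[], rfl, ?_⟩
    simp only [listToReportLoop, List.foldl_nil]
    congr 1
    apply List.ext_getElem
    · simp [hlen]
    · intro n h1 h2
      have hn : n < 31 := by simpa using h2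
      simp only [List.getElem_map, List.getElem_range]
      rw [List.getD_eq_getElem tmp "" (by omega)]
  | cons i rest ih =>
    intro tmp hpre hlen
    have hpre' : Pre_listToReport rest ∧ pvDic.contains i.2 = true := by
      unfold Pre_listToReport at hpre ⊢
      simp only [List.all_cons, Bool.and_eq_true] at hpre
      exact ⟨hpre.2, hpre.1⟩
    obtain ⟨idx, hidx⟩ := Option.isSome_iff_exists.mp (pvDic_get?_isSome i.2 hpre'.2)
    obtain ⟨hnn, hlt⟩ := pvDic_get?_bounds i.2 idx hidx
    set m : Nat := idx.toNat with hm
    have hcast : (m : Int) = idx := Int.toNat_of_nonneg hnn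
    have hm31 : m < 31 := by omega
    have hml : m < tmp.length := by omega
    -- A's pop-then-insert at slot m is List.set
    have hpop : PySem.List.pop? tmp idx = some (tmp[m], tmp.eraseIdx m) := by
      rw [← hcast]; exact PySem.List.pop?_natCast tmp m hml
    have htk : (tmp.take m).length = m := by simp; omega
    have hins : PySem.List.insert (tmp.eraseIdx m) idx (PySem.Int.toStr i.1)
        = tmp.set m (PySem.Int.toStr i.1) := by
      have hel : (tmp.eraseIdx m).length = tmp.length - 1 := by
        rw [List.length_eraseIdx]; simp [hml]
      rw [← hcast, PySem.List.insert_natCast _ m _ (by omega)]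
      rw [List.eraseIdx_eq_take_drop_succ, List.take_left' htk, List.drop_left' htk]
      simp [List.set_eq_take_append_cons_drop, hml]
    obtain ⟨keyed, hk, hl⟩ := ih (tmp.set m (PySem.Int.toStr i.1)) hpre'.1 (by simp [hlen])
    refine ⟨(idx, PySem.Int.toStr i.1) :: keyed, ?_, ?_⟩
    · simp only [listToReportKeyed, hidx, hk]
    · simp only [listToReportLoop, hidx, hpop]
      rw [hins, hl]
      congr 1
      apply List.map_congr_left
      intro n hn
      have hn31 : n < 31 := List.mem_range.mp hn
      simp only [List.foldl_cons]
      congr 1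
      by_cases hnm : n = m
      · subst hnm
        rw [if_pos (by simp [hcast])]
        rw [List.getD_eq_getElem _ "" (by simp [hlen]; omega)]
        simp
      · have hne : ¬ (idx == (n : Int)) = true := by
          simp only [beq_iff_eq]; omega
        rw [if_neg hne]
        rw [List.getD_eq_getElem _ "" (by simp [hlen]; omega),
            List.getD_eq_getElem _ "" (by omega)]
        have hmn : ¬ (m = n) := fun h => hnm h.symm
        simp [hmn]

-- the initial tmp is 31 empty strings
lemma tmp0_eq : (PySem.List.pyRange 0 (pvDic.size + 1) 1).foldl
    (fun (t : List String) _ => t ++ [""]) [] = List.replicate 31 "" := by decide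

-- B's outer append loop over the 31 positions is a map over range 31
lemma alt_outer_eq (keyed : List (Int × String)) :
    (PySem.List.pyRange 0 (pvDic.size + 1) 1).foldl
      (fun result k => result ++ [listToReportCell keyed k]) []
    = (List.range 31).map (fun (n : Nat) => listToReportCell keyed (n : Int)) := by
  rw [PySem.List.foldl_append_singleton_eq_map]
  have h31 : ((pvDic.size : Int) + 1) = 31 := by decide
  rw [h31, PySem.List.pyRange_one]
  simp [List.map_map, Function.comp_def]

-- ===== VERDICT (by name: the statement is the Claim_ definition above) =====
theorem listToReport_spec : Claim_equal_listToReport := by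
  intro items _ hpre
  unfold Spec_listToReport listToReport listToReport_alt
  obtain ⟨keyed, hk, hl⟩ := listToReport_main items (List.replicate 31 "") hpre (by simp)
  rw [tmp0_eq, hl, hk]
  simp only [Option.getD_some, alt_outer_eq]
  apply List.map_congr_left
  intro n hn
  unfold listToReportCell
  congr 1
  rw [List.getD_eq_getElem _ "" (by simpa using List.mem_range.mp hn)]
  apply List.getElem_replicate
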